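-- pv_equiv track=rewrite | github.com/moonemoji/scavgen | scripts/screens/TalkScreen.py | relationship_check
-- ===== SOURCE A (Python) =====
-- def relationship_check(talk, cat_relationship):
--     relationship_conditions = {
--         'hate': 50,
--         'romantic_like': 30,
--         'platonic_like': 30,
--         'jealousy': 30,
--         'dislike': 30,
--         'comfort': 30,
--         'respect': 30,
--         'trust': 30
--     }
--     tags = talk["intro"] if "intro" in talk else talk[0]
--     for key, value in relationship_conditions.items():
--         if key in tags and cat_relationship < value:
--             return True
--     return False
-- ===== SOURCE B (Python) =====
-- def relationship_check(talk, cat_relationship):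
--     relationship_conditions = {
--         'hate': 50,
--         'romantic_like': 30,
--         'platonic_like': 30,
--         'jealousy': 30,
--         'dislike': 30,
--         'comfort': 30,
--         'respect': 30,
--         'trust': 30
--     }
--     tags = talk["intro"] if "intro" in talk else talk[0]
--     vals = [v for k, v in relationship_conditions.items() if k in tags]
--     return bool(vals) and cat_relationship < max(vals)
-- ===== Notes on version B (the rewrite author's own statement) =====
-- stated objective: simpler
-- what changed: Replaces the early-return existence loop over the condition dict by an aggregate form: collect the thresholds whose key occurs in the tags, then compare cat_relationship once against their maximum.
import Mathlib
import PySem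

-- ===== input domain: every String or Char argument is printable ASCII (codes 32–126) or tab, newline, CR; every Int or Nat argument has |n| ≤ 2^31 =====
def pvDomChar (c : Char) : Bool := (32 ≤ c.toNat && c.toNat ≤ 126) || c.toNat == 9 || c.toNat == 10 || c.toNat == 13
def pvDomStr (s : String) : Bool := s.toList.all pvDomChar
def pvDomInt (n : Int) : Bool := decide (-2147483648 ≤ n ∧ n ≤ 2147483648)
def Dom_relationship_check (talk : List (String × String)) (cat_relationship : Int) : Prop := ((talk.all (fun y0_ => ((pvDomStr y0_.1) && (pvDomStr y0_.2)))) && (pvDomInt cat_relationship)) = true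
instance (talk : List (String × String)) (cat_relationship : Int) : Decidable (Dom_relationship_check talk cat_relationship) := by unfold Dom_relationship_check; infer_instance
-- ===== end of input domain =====

-- B replaces A's early-return existence loop by "max of the present thresholds, then one comparison".
-- ===== PORT A =====
def pvCondsA : List (String × Int) :=
  [("hate", 50), ("romantic_like", 30), ("platonic_like", 30), ("jealousy", 30),
   ("dislike", 30), ("comfort", 30), ("respect", 30), ("trust", 30)]

def pvLoopA (cat_relationship : Int) (tags : String) : List (String × Int) → Bool
  | [] => false
  | (k, v) :: rest =>
      if PySem.Str.isIn k tags && decide (cat_relationship < v) then true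
      else pvLoopA cat_relationship tags rest

def relationship_check (talk : List (String × String)) (cat_relationship : Int) : Bool :=
  -- tags = talk["intro"] if "intro" in talk else talk[0]; without "intro" Python raises KeyError (excluded by Pre_)
  match PySem.Dict.get? ⟨talk⟩ "intro" with
  | none => false
  | some tags => pvLoopA cat_relationship tags pvCondsA

-- ===== PORT B =====
def pvCondsB : List (String × Int) :=
  [("hate", 50), ("romantic_like", 30), ("platonic_like", 30), ("jealousy", 30),
   ("dislike", 30), ("comfort", 30), ("respect", 30), ("trust", 30)]

def relationship_check_alt (talk : List (String × String)) (cat_relationship : Int) : Bool :=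
  match PySem.Dict.get? ⟨talk⟩ "intro" with
  | none => false
  | some tags =>
      let vals := pvCondsB.filterMap (fun kv => if PySem.Str.isIn kv.1 tags then some kv.2 else none)
      !vals.isEmpty && match PySem.List.max? vals (fun x => x) with
                       | none => false
                       | some m => decide (cat_relationship < m)

-- ===== PRECONDITION & SPEC =====
-- Pre_ excludes dicts without key "intro": there A evaluates talk[0] and raises KeyError.
def Pre_relationship_check (talk : List (String × String)) (cat_relationship : Int) : Prop :=
  PySem.Dict.contains ⟨talk⟩ "intro" = true
instance (talk : List (String × String)) (cat_relationship : Int) : Decidable (Pre_relationship_check talk cat_relationship) := by unfold Pre_relationship_check; infer_instance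
def pvWitness_relationship_check : (List (String × String)) × Int := ([("intro", "hate trust")], 40)
def Spec_relationship_check (talk : List (String × String)) (cat_relationship : Int) (out : Bool) : Prop := out = relationship_check_alt talk cat_relationship
instance (talk : List (String × String)) (cat_relationship : Int) (out : Bool) : Decidable (Spec_relationship_check talk cat_relationship out) := by unfold Spec_relationship_check; infer_instance

-- ===== CLAIM (what is proved, stated in full; the proofs are below) =====
def Claim_equal_relationship_check : Prop := ∀ (talk : List (String × String)) (cat_relationship : Int), Dom_relationship_check talk cat_relationship → Pre_relationship_check talk cat_relationship → Spec_relationship_check talk cat_relationship (relationship_check talk cat_relationship)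

-- ===== LEMMAS AND PROOFS =====
theorem pvCondsB_eq : pvCondsB = pvCondsA := rfl

theorem pvLoopA_eq_true {cat : Int} {tags : String} {L : List (String × Int)} :
    pvLoopA cat tags L = true ↔ ∃ kv ∈ L, PySem.Str.isIn kv.1 tags = true ∧ cat < kv.2 := by
  induction L with
  | nil => simp [pvLoopA]
  | cons hd tl ih =>
      obtain ⟨k, v⟩ := hd
      by_cases h : PySem.Str.isIn k tags = true ∧ cat < v
      · have hL : pvLoopA cat tags ((k, v) :: tl) = true := by
          conv_lhs => rw [pvLoopA]
          rw [if_pos (by rw [decide_eq_true h.2, Bool.and_true]; exact h.1)]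
        simp only [hL, true_iff]
        exact ⟨(k, v), List.mem_cons_self, h.1, h.2⟩
      · have hstep : pvLoopA cat tags ((k, v) :: tl) = pvLoopA cat tags tl := by
          conv_lhs => rw [pvLoopA]
          rw [if_neg (by rcases not_and_or.mp h with h' | h' <;> simp_all)]
        rw [hstep, ih]
        constructor
        · rintro ⟨kv, hkv, hrest⟩; exact ⟨kv, List.mem_cons_of_mem _ hkv, hrest⟩
        · rintro ⟨kv, hkv, hrest⟩
          rcases List.mem_cons.mp hkv with rfl | hkv'
          · exact absurd hrest h
          · exact ⟨kv, hkv', hrest⟩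

theorem pvAlt_eq_true {cat : Int} {vals : List Int} :
    (!vals.isEmpty && match PySem.List.max? vals (fun x => x) with
                      | none => false
                      | some m => decide (cat < m)) = true ↔ ∃ v ∈ vals, cat < v := by
  cases hv : PySem.List.max? vals (fun x => x) with
  | none =>
      have : vals = [] := (PySem.List.max?_eq_none_iff _ _).mp hv
      subst this; simp
  | some m =>
      have hm : m ∈ vals := PySem.List.max?_mem hv
      have hmax := PySem.List.max?_isMax hv
      have hne : vals ≠ [] := by rintro rfl; simp [PySem.List.max?] at hv
      have hE : vals.isEmpty = false := by simpa using hne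
      simp only [hE, Bool.not_false, Bool.true_and]
      constructor
      · intro h; exact ⟨m, hm, by simpa using h⟩
      · rintro ⟨v, hv', hlt⟩
        have := hmax v hv'
        simp only [decide_eq_true_iff]
        omega

-- ===== VERDICT (by name: the statement is the Claim_ definition above) =====
theorem relationship_check_spec : Claim_equal_relationship_check := by
  intro talk cat _ _
  unfold Spec_relationship_check relationship_check relationship_check_alt
  cases PySem.Dict.get? ⟨talk⟩ "intro" with
  | none => rfl
  | some tags =>
      rw [Bool.eq_iff_iff, pvLoopA_eq_true, pvAlt_eq_true]
      simp only [List.mem_filterMap, pvCondsB_eq]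
      constructor
      · rintro ⟨kv, hkv, hin, hlt⟩
        exact ⟨kv.2, ⟨kv, hkv, by rw [if_pos hin]⟩, hlt⟩
      · rintro ⟨v, ⟨kv, hkv, hf⟩, hlt⟩
        by_cases hin : PySem.Str.isIn kv.1 tags = true
        · rw [if_pos hin] at hf
          obtain rfl := Option.some.inj hf
          exact ⟨kv, hkv, hin, hlt⟩
        · rw [if_neg hin] at hf
          simp at hf
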